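-- pv_equiv track=rewrite | github.com/francy51/nanoDiffusionChat | src/data/prepare.py | _chunk_and_pad
-- ===== SOURCE A (Python) =====
-- def _chunk_and_pad(
--     token_ids: list[int],
--     seq_len: int,
--     pad_token_id: int,
-- ) -> list[list[int]]:
--     if seq_len <= 0:
--         raise ValueError(f"seq_len must be positive, got {seq_len}")
--     if not token_ids:
--         return []
--
--     chunks: list[list[int]] = []
--     for start in range(0, len(token_ids), seq_len):
--         chunk = token_ids[start : start + seq_len]
--         if len(chunk) < seq_len:
--             chunk = chunk + [pad_token_id] * (seq_len - len(chunk))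
--         chunks.append(chunk)
--     return chunks
-- ===== SOURCE B (Python) =====
-- def _chunk_and_pad(
--     token_ids: list[int],
--     seq_len: int,
--     pad_token_id: int,
-- ) -> list[list[int]]:
--     if seq_len <= 0:
--         raise ValueError(f"seq_len must be positive, got {seq_len}")
--     if not token_ids:
--         return []
--     n = len(token_ids)
--     num_chunks = (n + seq_len - 1) // seq_len
--     total = num_chunks * seq_len
--     padded = token_ids + [pad_token_id] * (total - n)
--     return [padded[i : i + seq_len] for i in range(0, total, seq_len)]
-- ===== Notes on version B (the rewrite author's own statement) =====
-- stated objective: alternative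
-- what changed: B pads the whole token list up front to a multiple of seq_len and then splits it with a single branch-free slicing pass, instead of A's per-chunk conditional padding inside the loop.
import Mathlib
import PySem

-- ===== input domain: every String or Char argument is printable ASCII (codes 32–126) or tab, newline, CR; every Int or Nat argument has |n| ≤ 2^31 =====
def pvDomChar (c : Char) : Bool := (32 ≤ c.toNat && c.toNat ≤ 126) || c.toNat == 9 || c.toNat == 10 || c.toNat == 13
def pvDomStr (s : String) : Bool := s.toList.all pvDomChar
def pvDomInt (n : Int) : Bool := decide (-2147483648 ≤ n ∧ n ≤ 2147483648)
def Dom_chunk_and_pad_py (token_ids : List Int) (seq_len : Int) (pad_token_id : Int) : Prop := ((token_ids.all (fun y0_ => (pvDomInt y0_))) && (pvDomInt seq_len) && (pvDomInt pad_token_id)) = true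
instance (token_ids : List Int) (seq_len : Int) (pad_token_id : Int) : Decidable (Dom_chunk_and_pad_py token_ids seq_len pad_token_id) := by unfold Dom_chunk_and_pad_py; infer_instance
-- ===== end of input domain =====

-- B pads the whole token list up front to a multiple of seq_len and then splits it in one
-- branch-free slicing pass, instead of A's per-chunk conditional padding inside the loop.

-- ===== PORT A =====
-- loop body of A: chunk = token_ids[start:start+seq_len]; pad if short
def chunkAtA (token_ids : List Int) (seq_len : Int) (pad_token_id : Int) (start : Int) : List Int :=
  let chunk := PySem.List.slice token_ids (some start) (some (start + seq_len))
  if (chunk.length : Int) < seq_len then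
    chunk ++ PySem.List.pyRepeat [pad_token_id] (seq_len - (chunk.length : Int))
  else chunk

def chunk_and_pad_py (token_ids : List Int) (seq_len : Int) (pad_token_id : Int) : List (List Int) :=
  -- 'if seq_len <= 0: raise ValueError' is excluded by Pre_chunk_and_pad_py
  if token_ids = [] then []
  else
    (PySem.List.pyRange 0 (token_ids.length : Int) seq_len).foldl
      (fun chunks start => chunks ++ [chunkAtA token_ids seq_len pad_token_id start]) []

-- ===== PORT B =====
def chunk_and_pad_py_alt (token_ids : List Int) (seq_len : Int) (pad_token_id : Int) : List (List Int) :=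
  if token_ids = [] then []
  else
    let n : Int := token_ids.length
    let num_chunks := PySem.Int.floordiv (n + seq_len - 1) seq_len
    let total := num_chunks * seq_len
    let padded := token_ids ++ PySem.List.pyRepeat [pad_token_id] (total - n)
    (PySem.List.pyRange 0 total seq_len).map
      (fun i => PySem.List.slice padded (some i) (some (i + seq_len)))

-- ===== PRECONDITION & SPEC =====
-- Pre_ excludes exactly seq_len ≤ 0, where A (and B) raise ValueError.
def Pre_chunk_and_pad_py (token_ids : List Int) (seq_len : Int) (pad_token_id : Int) : Prop :=
  0 < seq_len
instance (token_ids : List Int) (seq_len : Int) (pad_token_id : Int) : Decidable (Pre_chunk_and_pad_py token_ids seq_len pad_token_id) := by unfold Pre_chunk_and_pad_py; infer_instance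

def pvWitness_chunk_and_pad_py : List Int × Int × Int := ([1, 2, 3], 2, 0)

def Spec_chunk_and_pad_py (token_ids : List Int) (seq_len : Int) (pad_token_id : Int) (out : List (List Int)) : Prop := out = chunk_and_pad_py_alt token_ids seq_len pad_token_id
instance (token_ids : List Int) (seq_len : Int) (pad_token_id : Int) (out : List (List Int)) : Decidable (Spec_chunk_and_pad_py token_ids seq_len pad_token_id out) := by unfold Spec_chunk_and_pad_py; infer_instance

-- ===== CLAIM (what is proved, stated in full; the proofs are below) =====
def Claim_equal_chunk_and_pad_py : Prop := ∀ (token_ids : List Int) (seq_len : Int) (pad_token_id : Int), Dom_chunk_and_pad_py token_ids seq_len pad_token_id → Pre_chunk_and_pad_py token_ids seq_len pad_token_id → Spec_chunk_and_pad_py token_ids seq_len pad_token_id (chunk_and_pad_py token_ids seq_len pad_token_id)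

-- ===== LEMMAS AND PROOFS =====

-- padding the whole list first, then slicing, equals slicing then padding the short tail
lemma take_drop_pad (l : List Int) (pad : Int) (t j p : ℕ) (h : j + t ≤ l.length + p) :
    ((l ++ List.replicate p pad).drop j).take t
      = (l.drop j).take t ++ List.replicate (t - ((l.drop j).take t).length) pad := by
  rw [List.drop_append, List.take_append]
  rw [List.drop_replicate, List.take_replicate]
  congr 1
  simp only [List.length_take, List.length_drop]
  congr 1
  omega

-- the ceiling count: (k*s + s - 1) / s = k for 0 < s
lemma ceil_count (k s : Int) (hs : 0 < s) : (k * s + s - 1) / s = k := by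
  rw [show k * s + s - 1 = (s - 1) + k * s by ring,
      Int.add_mul_ediv_right _ _ (ne_of_gt hs),
      Int.ediv_eq_zero_of_lt (by omega) (by omega)]
  ring

theorem chunk_and_pad_py_spec : Claim_equal_chunk_and_pad_py := by
  intro token_ids seq_len pad_token_id _ hpre
  unfold Spec_chunk_and_pad_py chunk_and_pad_py chunk_and_pad_py_alt
  by_cases hnil : token_ids = []
  · simp [hnil]
  · simp only [if_neg hnil]
    have hs : 0 < seq_len := hpre
    have hn : 0 < (token_ids.length : Int) := by
      simpa using List.length_pos_iff.mpr hnil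
    set n : Int := (token_ids.length : Int) with hn_def
    rw [PySem.Int.floordiv_eq_ediv_of_pos hs]
    set k : Int := (n + seq_len - 1) / seq_len with hk_def
    have hk1 : 1 ≤ k := by
      rw [hk_def, Int.le_ediv_iff_mul_le hs]; omega
    have hks : n ≤ k * seq_len ∧ k * seq_len < n + seq_len := by
      constructor
      · have := Int.ediv_add_emod (n + seq_len - 1) seq_len
        have := Int.emod_lt_of_pos (n + seq_len - 1) hs
        nlinarith [Int.emod_nonneg (n + seq_len - 1) (ne_of_gt hs)]
      · have := Int.ediv_add_emod (n + seq_len - 1) seq_len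
        nlinarith [Int.emod_nonneg (n + seq_len - 1) (ne_of_gt hs)]
    rw [PySem.List.foldl_append_singleton_eq_map, List.nil_append]
    rw [PySem.List.pyRange_of_pos _ _ hs, PySem.List.pyRange_of_pos _ _ hs]
    rw [if_pos (by omega : (0:Int) < n), if_pos (by nlinarith : (0:Int) < k * seq_len)]
    have hcA : (n - 0 + seq_len - 1) / seq_len = k := by rw [hk_def]; ring_nf
    have hcB : (k * seq_len - 0 + seq_len - 1) / seq_len = k := by
      rw [show k * seq_len - 0 + seq_len - 1 = k * seq_len + seq_len - 1 by ring,
          ceil_count _ _ hs]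
    rw [hcA, hcB, List.map_map, List.map_map]
    apply List.map_congr_left
    intro m hm
    simp only [List.mem_range] at hm
    have hm' : (m : Int) < k := by
      have := Int.toNat_of_nonneg (by omega : (0:Int) ≤ k)
      omega
    simp only [Function.comp]
    have hstart : (0:Int) ≤ 0 + seq_len * m := by positivity
    unfold chunkAtA
    rw [PySem.List.pyRepeat_singleton]
    rw [PySem.List.slice_toNat _ hstart (by omega),
        PySem.List.slice_toNat _ hstart (by omega)]
    set j : ℕ := (0 + seq_len * (m:Int)).toNat with hj_def
    have hjt : (0 + seq_len * (m:Int) + seq_len).toNat = j + seq_len.toNat := by omega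
    rw [hjt]
    have hts : j + seq_len.toNat - j = seq_len.toNat := by omega
    rw [hts]
    -- side condition for take_drop_pad
    have hjbound : (j : Int) + seq_len ≤ k * seq_len := by
      have : (j : Int) = seq_len * m := by omega
      nlinarith
    have hpnat : ((k * seq_len - n).toNat : Int) = k * seq_len - n := by
      have := hks.1; omega
    have hside : j + seq_len.toNat ≤ token_ids.length + (k * seq_len - n).toNat := by
      omega
    rw [take_drop_pad _ _ _ _ _ hside]
    set c := (token_ids.drop j).take seq_len.toNat with hc_def
    have hclen : c.length ≤ seq_len.toNat := by
      rw [hc_def]; simp [List.length_take]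
    by_cases hlt : (c.length : Int) < seq_len
    · rw [if_pos hlt]
      congr 1
      rw [PySem.List.pyRepeat_singleton]
      congr 1
      omega
    · rw [if_neg hlt]
      have : c.length = seq_len.toNat := by omega
      rw [this]
      simp
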